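-- pv_equiv track=rewrite | github.com/c19o/TB | v3.3/gpu_histogram_fork/src/cuda_compat.py | _max_cuda_for_driver
-- ===== SOURCE A (Python) =====
-- from typing import Dict, List, Optional, Tuple
--
-- DRIVER_CUDA_MAP = {
--     525: (12, 0),
--     535: (12, 2),
--     545: (12, 3),
--     550: (12, 4),
--     555: (12, 5),
--     560: (12, 6),
--     565: (12, 7),
--     570: (12, 8),
--     575: (12, 9),
--     580: (13, 0),
--     585: (13, 1),
-- }
--
-- def _max_cuda_for_driver(driver_major: int) -> Tuple[int, int]:
--     """Look up max CUDA version supported by a driver major version.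
--     Uses the closest known entry at or below the given driver major.
--     """
--     best_driver = None
--     for d in sorted(DRIVER_CUDA_MAP.keys()):
--         if d <= driver_major:
--             best_driver = d
--     if best_driver is not None:
--         return DRIVER_CUDA_MAP[best_driver]
--     # Unknown old driver -- assume CUDA 11.8 minimum
--     return (11, 8)
-- ===== SOURCE B (Python) =====
-- DRIVER_CUDA_MAP = {
--     525: (12, 0),
--     535: (12, 2),
--     545: (12, 3),
--     550: (12, 4),
--     555: (12, 5),
--     560: (12, 6),
--     565: (12, 7),
--     570: (12, 8),
--     575: (12, 9),
--     580: (13, 0),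
--     585: (13, 1),
-- }
--
-- _SORTED_KEYS = sorted(DRIVER_CUDA_MAP.keys())
--
-- def _bisect_right(keys, x, lo, hi):
--     # index where x would be inserted keeping keys sorted, after equal keys
--     while lo < hi:
--         mid = (lo + hi) // 2
--         if x < keys[mid]:
--             hi = mid
--         else:
--             lo = mid + 1
--     return lo
--
-- def _max_cuda_for_driver(driver_major: int):
--     i = _bisect_right(_SORTED_KEYS, driver_major, 0, len(_SORTED_KEYS))
--     if i == 0:
--         return (11, 8)
--     return DRIVER_CUDA_MAP[_SORTED_KEYS[i - 1]]
-- ===== Notes on version B (the rewrite author's own statement) =====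
-- stated objective: alternative
-- what changed: Replaced A's linear scan over every sorted key with a hand-written bisect_right binary search on the precomputed sorted key list; insertion index 0 means the pre-map default, otherwise the map entry just below.
import Mathlib
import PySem

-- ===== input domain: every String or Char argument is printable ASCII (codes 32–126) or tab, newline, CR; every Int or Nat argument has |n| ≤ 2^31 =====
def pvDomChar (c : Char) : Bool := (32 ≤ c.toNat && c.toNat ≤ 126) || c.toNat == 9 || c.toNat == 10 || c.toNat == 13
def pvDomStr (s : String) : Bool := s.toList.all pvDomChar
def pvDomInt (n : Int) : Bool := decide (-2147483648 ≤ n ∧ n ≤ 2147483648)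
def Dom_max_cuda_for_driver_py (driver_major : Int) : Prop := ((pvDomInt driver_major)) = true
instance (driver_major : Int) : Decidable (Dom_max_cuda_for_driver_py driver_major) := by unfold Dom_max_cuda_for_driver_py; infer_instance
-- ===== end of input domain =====

-- B replaces A's linear scan over all sorted keys with a binary search (bisect_right) on the
-- precomputed sorted key list; same return value everywhere (objective: idiomatic/alternative).

-- ===== PORT A =====
def pvDriverCudaMap : PySem.Dict Int (Int × Int) :=
  PySem.Dict.ofList [(525, (12, 0)), (535, (12, 2)), (545, (12, 3)), (550, (12, 4)),
    (555, (12, 5)), (560, (12, 6)), (565, (12, 7)), (570, (12, 8)),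
    (575, (12, 9)), (580, (13, 0)), (585, (13, 1))]

def max_cuda_for_driver_py (driver_major : Int) : Int × Int :=
  let best :=
    (PySem.List.sorted pvDriverCudaMap.keys (fun x => x) false).foldl
      (fun best d => if d ≤ driver_major then some d else best) none
  match best with
  | some b => (pvDriverCudaMap.get? b).getD (0, 0)  -- key always present: get? never none here
  | none => (11, 8)

-- ===== PORT B =====
def pvSortedKeys : List Int := PySem.List.sorted pvDriverCudaMap.keys (fun x => x) false

-- hand-written bisect_right, as in Source B (Source B cannot import bisect)
def pvBisectRight (keys : List Int) (x : Int) (lo hi : Nat) : Nat :=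
  if _h : lo < hi then
    let mid := (lo + hi) / 2
    if x < keys.getD mid 0 then pvBisectRight keys x lo mid
    else pvBisectRight keys x (mid + 1) hi
  else lo
termination_by hi - lo

def max_cuda_for_driver_py_alt (driver_major : Int) : Int × Int :=
  let i := pvBisectRight pvSortedKeys driver_major 0 pvSortedKeys.length
  if i = 0 then (11, 8)
  else (pvDriverCudaMap.get? (pvSortedKeys.getD (i - 1) 0)).getD (0, 0)

-- ===== PRECONDITION & SPEC =====
def Spec_max_cuda_for_driver_py (driver_major : Int) (out : Int × Int) : Prop := out = max_cuda_for_driver_py_alt driver_major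
instance (driver_major : Int) (out : Int × Int) : Decidable (Spec_max_cuda_for_driver_py driver_major out) := by unfold Spec_max_cuda_for_driver_py; infer_instance

-- ===== CLAIM (what is proved, stated in full; the proofs are below) =====
def Claim_equal_max_cuda_for_driver_py : Prop := ∀ (driver_major : Int), Dom_max_cuda_for_driver_py driver_major → Spec_max_cuda_for_driver_py driver_major (max_cuda_for_driver_py driver_major)

-- ===== LEMMAS AND PROOFS =====
theorem pvSortedKeys_eq : pvSortedKeys = [525, 535, 545, 550, 555, 560, 565, 570, 575, 580, 585] := by
  rfl

theorem pvSortedA_eq : PySem.List.sorted pvDriverCudaMap.keys (fun x => x) false = [525, 535, 545, 550, 555, 560, 565, 570, 575, 580, 585] := by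
  rfl

theorem pvLen_eq : pvSortedKeys.length = 11 := by rfl

-- ===== VERDICT (by name: the statement is the Claim_ definition above) =====
set_option maxRecDepth 4000 in
set_option maxHeartbeats 1600000 in
theorem max_cuda_for_driver_py_spec : Claim_equal_max_cuda_for_driver_py := by
  intro d _
  unfold Spec_max_cuda_for_driver_py max_cuda_for_driver_py max_cuda_for_driver_py_alt
  rw [pvSortedA_eq, pvLen_eq]
  simp only [List.foldl]
  simp [pvBisectRight, pvSortedKeys_eq]
  split_ifs <;> simp_all <;> omega
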